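-- pv_equiv track=rewrite | github.com/LZY-lzy2025/jrs833 | main.py | str2long
-- ===== SOURCE A (Python) =====
-- def str2long(s):
--     v = []
--     for i in range(0, len(s), 4):
--         val = ord(s[i])
--         if i + 1 < len(s): val |= ord(s[i+1]) << 8
--         if i + 2 < len(s): val |= ord(s[i+2]) << 16
--         if i + 3 < len(s): val |= ord(s[i+3]) << 24
--         v.append(val)
--     return v
-- ===== SOURCE B (Python) =====
-- def str2long(s):
--     v = []
--     val = 0
--     for i, c in enumerate(s):
--         r = i % 4
--         if r == 0:
--             val = 0
--         val |= ord(c) << (8 * r)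
--         if r == 3:
--             v.append(val)
--     if len(s) % 4 != 0:
--         v.append(val)
--     return v
-- ===== Notes on version B (the rewrite author's own statement) =====
-- stated objective: alternative
-- what changed: Replaces the strided loop over group start indices with its four guarded random accesses s[i+1..3] by a single flat enumerate pass keeping a running accumulator that is reset every 4th character and flushed on group end plus a final partial-group flush.
import Mathlib
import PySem

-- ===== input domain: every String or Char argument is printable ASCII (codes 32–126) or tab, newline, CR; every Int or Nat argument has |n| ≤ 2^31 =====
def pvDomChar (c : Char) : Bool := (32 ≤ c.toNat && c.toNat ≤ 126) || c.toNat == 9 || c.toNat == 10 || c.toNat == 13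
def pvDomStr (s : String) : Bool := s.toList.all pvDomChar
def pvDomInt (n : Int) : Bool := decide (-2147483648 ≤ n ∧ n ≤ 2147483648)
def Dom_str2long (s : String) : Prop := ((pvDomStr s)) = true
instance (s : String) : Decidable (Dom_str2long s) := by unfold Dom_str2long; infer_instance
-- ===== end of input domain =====

-- B replaces A's strided group-start loop (four guarded random accesses per group) by one flat
-- pass over the characters with a running accumulator, reset/flushed at 4-char group boundaries;
-- an alternative decomposition of the same cost. The ports agree on all strings.

-- ===== PORT A =====
def str2long (s : String) : List Int :=
  (PySem.List.pyRange 0 (PySem.Str.len s) 4).foldl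
    (fun v i =>
      let val : Int := ((PySem.List.pyGetD s.toList i ' ').toNat : Int)
      let val := if i + 1 < PySem.Str.len s then
        PySem.Int.bor val (((PySem.List.pyGetD s.toList (i + 1) ' ').toNat : Int) <<< (8 : Nat)) else val
      let val := if i + 2 < PySem.Str.len s then
        PySem.Int.bor val (((PySem.List.pyGetD s.toList (i + 2) ' ').toNat : Int) <<< (16 : Nat)) else val
      let val := if i + 3 < PySem.Str.len s then
        PySem.Int.bor val (((PySem.List.pyGetD s.toList (i + 3) ' ').toNat : Int) <<< (24 : Nat)) else val
      v ++ [val]) []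

-- ===== PORT B =====
def str2long_alt (s : String) : List Int :=
  let st := (PySem.List.enumerate s.toList 0).foldl
    (fun (st : Int × List Int) ic =>
      let r := PySem.Int.mod ic.1 4
      let val := if r = 0 then (0 : Int) else st.1
      let val := PySem.Int.bor val ((ic.2.toNat : Int) <<< (8 * r).toNat)
      let v := if r = 3 then st.2 ++ [val] else st.2
      (val, v)) (0, [])
  if PySem.Int.mod (PySem.Str.len s) 4 ≠ 0 then st.2 ++ [st.1] else st.2

-- ===== PRECONDITION & SPEC =====
def Spec_str2long (s : String) (out : List Int) : Prop := out = str2long_alt s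
instance (s : String) (out : List Int) : Decidable (Spec_str2long s out) := by unfold Spec_str2long; infer_instance

-- ===== CLAIM (what is proved, stated in full; the proofs are below) =====
def Claim_equal_str2long : Prop := ∀ (s : String), Dom_str2long s → Spec_str2long s (str2long s)

-- ===== LEMMAS AND PROOFS =====

-- encoded values of a (partial) little-endian 4-char group
def pvE1 (a : Char) : Int := (a.toNat : Int)
def pvE2 (a b : Char) : Int := PySem.Int.bor (pvE1 a) ((b.toNat : Int) <<< (8 : Nat))
def pvE3 (a b c : Char) : Int := PySem.Int.bor (pvE2 a b) ((c.toNat : Int) <<< (16 : Nat))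
def pvE4 (a b c d : Char) : Int := PySem.Int.bor (pvE3 a b c) ((d.toNat : Int) <<< (24 : Nat))

-- encodings of the complete 4-char groups, in order
def pvFull : List Char → List Int
  | a :: b :: c :: d :: u => pvE4 a b c d :: pvFull u
  | _ => []

-- encoding of the group the last character belongs to (0 for the empty list)
def pvLast : List Char → Int
  | [] => 0
  | [a] => pvE1 a
  | [a, b] => pvE2 a b
  | [a, b, c] => pvE3 a b c
  | a :: b :: c :: d :: u => if u.isEmpty then pvE4 a b c d else pvLast u

-- the common result both programs produce
def pvD (l : List Char) : List Int :=
  pvFull l ++ (if l.length % 4 ≠ 0 then [pvLast l] else [])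

-- A's per-group encoding, with Nat index arithmetic
def pvEncA (l : List Char) (k : Nat) : Int :=
  let n := l.length
  let val : Int := ((l.getD (4 * k) ' ').toNat : Int)
  let val := if 4 * k + 1 < n then PySem.Int.bor val (((l.getD (4 * k + 1) ' ').toNat : Int) <<< (8 : Nat)) else val
  let val := if 4 * k + 2 < n then PySem.Int.bor val (((l.getD (4 * k + 2) ' ').toNat : Int) <<< (16 : Nat)) else val
  let val := if 4 * k + 3 < n then PySem.Int.bor val (((l.getD (4 * k + 3) ' ').toNat : Int) <<< (24 : Nat)) else val
  val

def pvGA (l : List Char) : List Int := (List.range ((l.length + 3) / 4)).map (pvEncA l)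

-- B's loop body, named
def pvStep (st : Int × List Int) (ic : Int × Char) : Int × List Int :=
  let r := PySem.Int.mod ic.1 4
  let val := if r = 0 then (0 : Int) else st.1
  let val := PySem.Int.bor val ((ic.2.toNat : Int) <<< (8 * r).toNat)
  let v := if r = 3 then st.2 ++ [val] else st.2
  (val, v)

lemma pvBor_zero_left (x : Int) : PySem.Int.bor 0 x = x := by
  rw [PySem.Int.bor_comm, PySem.Int.bor_zero]

lemma pvStr2long_eq_gA (s : String) : str2long s = pvGA s.toList := by
  unfold str2long pvGA
  rw [PySem.List.foldl_append_singleton_eq_map]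
  rw [PySem.List.pyRange_of_pos _ _ (by norm_num)]
  simp only [PySem.Str.len_eq, List.map_map, List.nil_append]
  have hc : (if (0:Int) < (s.toList.length : Int) then (((s.toList.length : Int) - 0 + 4 - 1) / 4).toNat else 0) = (s.toList.length + 3) / 4 := by split_ifs with h <;> omega
  rw [hc]
  apply List.map_congr_left
  intro k _
  simp only [Function.comp_apply, pvEncA]
  have h4 : (0 : Int) + 4 * (k : Int) = ((4 * k : Nat) : Int) := by push_cast; ring
  rw [h4]
  have h1 : ((4 * k : Nat) : Int) + 1 = ((4 * k + 1 : Nat) : Int) := by push_cast; ring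
  have h2 : ((4 * k : Nat) : Int) + 2 = ((4 * k + 2 : Nat) : Int) := by push_cast; ring
  have h3 : ((4 * k : Nat) : Int) + 3 = ((4 * k + 3 : Nat) : Int) := by push_cast; ring
  rw [h1, h2, h3]
  simp only [PySem.List.pyGetD_natCast, Nat.cast_lt]

lemma pvEncA_shift (l : List Char) (k : Nat) : pvEncA l (k + 1) = pvEncA (l.drop 4) k := by
  have hget : ∀ j : Nat, (l.drop 4).getD j ' ' = l.getD (4 + j) ' ' := by
    intro j; simp [List.getD_eq_getElem?_getD, List.getElem?_drop]
  simp only [pvEncA, List.length_drop, hget]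
  simp only [show ∀ c : Nat, 4 + (4 * k + c) = 4 + 4 * k + c from fun c => by omega,
    show 4 * (k + 1) = 4 + 4 * k from by ring,
    show ∀ c : Nat, (4 * k + c < l.length - 4) = (4 + 4 * k + c < l.length) from
      fun c => by apply propext; omega]

lemma pvD_cons4 (a b c d : Char) (u : List Char) :
    pvD (a :: b :: c :: d :: u) = pvE4 a b c d :: pvD u := by
  rcases u with _ | ⟨x, u⟩
  · simp [pvD, pvFull]
  · simp only [pvD, pvFull, pvLast, List.isEmpty_cons, Bool.false_eq_true, if_false,
      List.length_cons]
    rw [show (u.length + 1 + 1 + 1 + 1 + 1) % 4 = (u.length + 1) % 4 from by omega]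
    simp [List.cons_append]

lemma pvGA_eq_D (l : List Char) : pvGA l = pvD l := by
  induction l using pvFull.induct with
  | case1 a b c d u ih =>
    have hdrop : List.drop 4 (a :: b :: c :: d :: u) = u := rfl
    have henc : pvEncA (a :: b :: c :: d :: u) 0 = pvE4 a b c d := by
      simp only [pvEncA, List.length_cons]
      rw [if_pos (by omega), if_pos (by omega), if_pos (by omega)]
      simp [pvE4, pvE3, pvE2, pvE1, List.getD]
    have hshift : (List.range ((u.length + 3) / 4)).map (pvEncA (a :: b :: c :: d :: u) ∘ Nat.succ)
        = pvGA u := by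
      unfold pvGA
      apply List.map_congr_left
      intro k _
      have h := pvEncA_shift (a :: b :: c :: d :: u) k
      rw [hdrop] at h
      simpa using h
    unfold pvGA
    simp only [List.length_cons]
    rw [show (u.length + 1 + 1 + 1 + 1 + 3) / 4 = (u.length + 3) / 4 + 1 from by omega,
      List.range_succ_eq_map, List.map_cons, List.map_map, hshift, henc, ih, pvD_cons4]
  | case2 l h =>
    rcases l with _ | ⟨a, _ | ⟨b, _ | ⟨c, _ | ⟨d, u⟩⟩⟩⟩
    · simp [pvGA, pvD, pvFull]
    · simp [pvGA, pvD, pvFull, pvLast, pvEncA, pvE1]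
    · simp [pvGA, pvD, pvFull, pvLast, pvEncA, pvE1, pvE2]
    · simp [pvGA, pvD, pvFull, pvLast, pvEncA, pvE1, pvE2, pvE3]
    · exact (h a b c d u rfl).elim

lemma pvFoldB_go (l : List Char) : ∀ (j : Nat) (val : Int) (acc : List Int),
    (PySem.List.enumerate l ((4 * j : Nat) : Int)).foldl pvStep (val, acc)
      = ((if l.isEmpty then val else pvLast l), acc ++ pvFull l) := by
  induction l using pvFull.induct with
  | case1 a b c d u ih =>
    intro j val acc
    have hm0 : PySem.Int.mod ((4 * j : Nat) : Int) 4 = 0 := by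
      rw [PySem.Int.mod_eq_emod_of_pos (by norm_num)]; omega
    have hm1 : PySem.Int.mod (((4 * j : Nat) : Int) + 1) 4 = 1 := by
      rw [PySem.Int.mod_eq_emod_of_pos (by norm_num)]; omega
    have hm2 : PySem.Int.mod (((4 * j : Nat) : Int) + 1 + 1) 4 = 2 := by
      rw [PySem.Int.mod_eq_emod_of_pos (by norm_num)]; omega
    have hm3 : PySem.Int.mod (((4 * j : Nat) : Int) + 1 + 1 + 1) 4 = 3 := by
      rw [PySem.Int.mod_eq_emod_of_pos (by norm_num)]; omega
    have hnext : ((4 * j : Nat) : Int) + 1 + 1 + 1 + 1 = ((4 * (j + 1) : Nat) : Int) := by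
      push_cast; ring
    simp only [PySem.List.enumerate_cons, List.foldl_cons]
    rw [show pvStep (val, acc) ((4 * j : Nat), a)
          = (pvE1 a, acc) from by
        simp only [pvStep]; rw [hm0]; norm_num [pvE1, pvBor_zero_left, show Int.toNat 8 = 8 from rfl, show Int.toNat 16 = 16 from rfl, show Int.toNat 24 = 24 from rfl]]
    rw [show pvStep (pvE1 a, acc) (((4 * j : Nat) : Int) + 1, b)
          = (pvE2 a b, acc) from by
        simp only [pvStep]; rw [hm1]; norm_num [pvE2, show Int.toNat 8 = 8 from rfl, show Int.toNat 16 = 16 from rfl, show Int.toNat 24 = 24 from rfl]]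
    rw [show pvStep (pvE2 a b, acc) (((4 * j : Nat) : Int) + 1 + 1, c)
          = (pvE3 a b c, acc) from by
        simp only [pvStep]; rw [hm2]; norm_num [pvE3, show Int.toNat 8 = 8 from rfl, show Int.toNat 16 = 16 from rfl, show Int.toNat 24 = 24 from rfl]]
    rw [show pvStep (pvE3 a b c, acc) (((4 * j : Nat) : Int) + 1 + 1 + 1, d)
          = (pvE4 a b c d, acc ++ [pvE4 a b c d]) from by
        simp only [pvStep]; rw [hm3]; norm_num [pvE4, show Int.toNat 8 = 8 from rfl, show Int.toNat 16 = 16 from rfl, show Int.toNat 24 = 24 from rfl]]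
    rw [hnext, ih (j + 1) (pvE4 a b c d) (acc ++ [pvE4 a b c d])]
    simp [pvLast, pvFull]
  | case2 l h =>
    intro j val acc
    have hm0 : PySem.Int.mod ((4 * j : Nat) : Int) 4 = 0 := by
      rw [PySem.Int.mod_eq_emod_of_pos (by norm_num)]; omega
    have hm1 : PySem.Int.mod (((4 * j : Nat) : Int) + 1) 4 = 1 := by
      rw [PySem.Int.mod_eq_emod_of_pos (by norm_num)]; omega
    have hm2 : PySem.Int.mod (((4 * j : Nat) : Int) + 1 + 1) 4 = 2 := by
      rw [PySem.Int.mod_eq_emod_of_pos (by norm_num)]; omega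
    rcases l with _ | ⟨a, _ | ⟨b, _ | ⟨c, _ | ⟨d, u⟩⟩⟩⟩
    · simp [PySem.List.enumerate_nil, pvFull]
    · simp only [PySem.List.enumerate_cons, PySem.List.enumerate_nil, List.foldl_cons, List.foldl_nil, pvStep]
      rw [hm0]
      norm_num [pvE1, pvBor_zero_left, pvFull, pvLast, show Int.toNat 8 = 8 from rfl, show Int.toNat 16 = 16 from rfl, show Int.toNat 24 = 24 from rfl]
    · simp only [PySem.List.enumerate_cons, PySem.List.enumerate_nil, List.foldl_cons, List.foldl_nil, pvStep]
      rw [hm0, hm1]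
      norm_num [pvE1, pvE2, pvBor_zero_left, pvFull, pvLast, show Int.toNat 8 = 8 from rfl, show Int.toNat 16 = 16 from rfl, show Int.toNat 24 = 24 from rfl]
    · simp only [PySem.List.enumerate_cons, PySem.List.enumerate_nil, List.foldl_cons, List.foldl_nil, pvStep]
      rw [hm0, hm1, hm2]
      norm_num [pvE1, pvE2, pvE3, pvBor_zero_left, pvFull, pvLast, show Int.toNat 8 = 8 from rfl, show Int.toNat 16 = 16 from rfl, show Int.toNat 24 = 24 from rfl]
    · exact (h a b c d u rfl).elim

lemma pvAlt_eq_D (s : String) : str2long_alt s = pvD s.toList := by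
  unfold str2long_alt
  have h0 : (0 : Int) = ((4 * 0 : Nat) : Int) := by norm_num
  rw [show PySem.List.enumerate s.toList 0 = PySem.List.enumerate s.toList ((4 * 0 : Nat) : Int) from by rw [← h0]]
  rw [show (fun (st : Int × List Int) ic =>
      let r := PySem.Int.mod ic.1 4
      let val := if r = 0 then (0 : Int) else st.1
      let val := PySem.Int.bor val ((ic.2.toNat : Int) <<< (8 * r).toNat)
      let v := if r = 3 then st.2 ++ [val] else st.2
      (val, v)) = pvStep from rfl]
  rw [pvFoldB_go s.toList 0 0 []]
  simp only [PySem.Str.len_eq]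
  rcases hl : s.toList with _ | ⟨a, t⟩
  · simp [pvD, pvFull]
  · have hc : PySem.Int.mod (((a :: t).length : Nat) : Int) 4 = (((a :: t).length % 4 : Nat) : Int) := by
      rw [PySem.Int.mod_eq_emod_of_pos (by norm_num)]; omega
    rw [hc]
    simp only [List.isEmpty_cons, Bool.false_eq_true, if_false, List.nil_append, pvD, ne_eq,
      Nat.cast_eq_zero]
    by_cases hm : (t.length + 1) % 4 = 0 <;> simp [hm]

-- ===== VERDICT (by name: the statement is the Claim_ definition above) =====
theorem str2long_spec : Claim_equal_str2long := by
  intro s _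
  unfold Spec_str2long
  rw [pvStr2long_eq_gA, pvGA_eq_D, pvAlt_eq_D]
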